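-- pv_equiv track=rewrite | github.com/thepratholic/Competitive-Programming | LeetCode/Biweekly Contest 176/Number of Prefix Connected Groups.py | prefixConnected
-- ===== SOURCE A (Python) =====
-- from typing import List
--
-- def prefixConnected(words: List[str], k: int) -> int:
--     n = len(words)
--
--     ans = 0
--
--     vis = {}
--     for i in range(n):
--         word = words[i]
--         if len(word) >= k:
--             vis[word[:k]] = vis.get(word[:k], 0) + 1
--
--     for cnt in vis.values():
--         if cnt >= 2:
--             ans += 1
--
--     return ans
-- ===== SOURCE B (Python) =====
-- from typing import List
--
-- def prefixConnected(words: List[str], k: int) -> int: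
--     ps = sorted(w[:k] for w in words if len(w) >= k)
--     ans = 0
--     i = 0
--     n = len(ps)
--     while i < n:
--         j = i + 1
--         while j < n and ps[j] == ps[i]:
--             j += 1
--         if j - i >= 2:
--             ans += 1
--         i = j
--     return ans
-- ===== Notes on version B (the rewrite author's own statement) =====
-- stated objective: alternative
-- what changed: Replaces the dict-of-counts plus value scan with sort-the-prefixes followed by a single run-length scan that counts runs of length >= 2.
import Mathlib
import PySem

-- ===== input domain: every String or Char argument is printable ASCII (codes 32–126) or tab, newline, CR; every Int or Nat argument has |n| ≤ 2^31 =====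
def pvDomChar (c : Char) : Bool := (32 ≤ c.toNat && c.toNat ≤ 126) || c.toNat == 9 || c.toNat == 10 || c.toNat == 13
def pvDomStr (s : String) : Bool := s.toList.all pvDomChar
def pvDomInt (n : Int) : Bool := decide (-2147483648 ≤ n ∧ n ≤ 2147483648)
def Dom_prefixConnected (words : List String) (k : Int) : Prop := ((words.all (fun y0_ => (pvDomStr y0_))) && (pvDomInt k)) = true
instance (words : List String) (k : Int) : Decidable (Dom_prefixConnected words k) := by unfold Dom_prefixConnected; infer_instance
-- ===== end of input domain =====

-- B changes the algorithm: sorted prefixes + one run-length scan instead of a dict of counts; same cost class, no speed claim.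

-- ===== PORT A =====
-- A: build vis[prefix] = count over words with len(word) >= k, then add 1 per count >= 2.
def prefixConnected (words : List String) (k : Int) : Int :=
  let vis : PySem.Dict String Int :=
    words.foldl (fun vis word =>
      if k ≤ (word.length : Int) then
        let p := PySem.Str.slice word none (some k)
        vis.insert p (vis.getD p 0 + 1)
      else vis) PySem.Dict.empty
  vis.values.foldl (fun ans cnt => if 2 ≤ cnt then ans + 1 else ans) 0

-- ===== PORT B =====
-- B helper: the run-length scan over the sorted prefix list (the two nested while loops:
-- the inner while takes the run of elements equal to ps[i]; j - i >= 2 adds 1).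
def pvRunScan (ps : List String) : Int :=
  match ps with
  | [] => 0
  | x :: rest =>
      (if 2 ≤ 1 + (rest.takeWhile (fun y => y == x)).length then 1 else 0)
        + pvRunScan (rest.dropWhile (fun y => y == x))
termination_by ps.length
decreasing_by exact Nat.lt_succ_of_le (List.length_dropWhile_le _ _)

def prefixConnected_alt (words : List String) (k : Int) : Int :=
  pvRunScan (PySem.List.sorted
    ((words.filter (fun w => k ≤ (w.length : Int))).map
      (fun w => PySem.Str.slice w none (some k))) (fun x => x) false)

-- ===== PRECONDITION & SPEC =====
def Spec_prefixConnected (words : List String) (k : Int) (out : Int) : Prop := out = prefixConnected_alt words k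
instance (words : List String) (k : Int) (out : Int) : Decidable (Spec_prefixConnected words k out) := by unfold Spec_prefixConnected; infer_instance

-- ===== CLAIM (what is proved, stated in full; the proofs are below) =====
def Claim_equal_prefixConnected : Prop := ∀ (words : List String) (k : Int), Dom_prefixConnected words k → Spec_prefixConnected words k (prefixConnected words k)

-- ===== LEMMAS AND PROOFS =====

-- the common spec: number of distinct elements of l occurring at least twice
def pvSpecCount (l : List String) : Nat := (l.toFinset.filter (fun p => 2 ≤ l.count p)).card

theorem pvSpecCount_perm {l l' : List String} (h : l.Perm l') : pvSpecCount l = pvSpecCount l' := by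
  unfold pvSpecCount
  rw [List.toFinset_eq_of_perm _ _ h]
  congr 1
  apply Finset.filter_congr
  intro p _
  simp [h.count_eq]

theorem pvFold_filterMap (words : List String) (k : Int) (d : PySem.Dict String Int) :
    (words.foldl (fun (vis : PySem.Dict String Int) word =>
      if k ≤ (word.length : Int) then
        let p := PySem.Str.slice word none (some k)
        vis.insert p (vis.getD p 0 + 1)
      else vis) d)
    = ((words.filter (fun w => k ≤ (w.length : Int))).map
        (fun w => PySem.Str.slice w none (some k))).foldl
        (fun vis p => vis.insert p (vis.getD p 0 + 1)) d := by
  induction words generalizing d with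
  | nil => rfl
  | cons w t ih =>
      by_cases hw : k ≤ (w.length : Int)
      · simp [hw, ih]
      · simp [hw, ih]

theorem pvCountP_ofList_eq_spec (ps : List String) :
    (PySem.Set.ofList ps).countP (fun p => decide (2 ≤ ps.count p)) = pvSpecCount ps := by
  unfold pvSpecCount
  rw [List.countP_eq_length_filter]
  have hnd : ((PySem.Set.ofList ps).filter (fun p => decide (2 ≤ ps.count p))).Nodup :=
    (PySem.Set.nodup_ofList ps).filter _
  rw [← List.toFinset_card_of_nodup hnd, List.toFinset_filter]
  congr 1
  apply Finset.ext
  intro p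
  simp [PySem.Set.mem_ofList]

theorem pvA_fold_dict (words : List String) (k : Int) :
    (words.foldl (fun (vis : PySem.Dict String Int) word =>
      if k ≤ (word.length : Int) then
        let p := PySem.Str.slice word none (some k)
        vis.insert p (vis.getD p 0 + 1)
      else vis) PySem.Dict.empty)
    = PySem.Dict.counter ((words.filter (fun w => k ≤ (w.length : Int))).map
        (fun w => PySem.Str.slice w none (some k))) := by
  rw [← PySem.Dict.foldl_insert_getD_add_one_eq_counter]
  exact pvFold_filterMap words k PySem.Dict.empty

theorem pvCount_fold (l : List Int) (a : Int) :
    l.foldl (fun ans cnt => if 2 ≤ cnt then ans + 1 else ans) a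
      = a + (l.countP (fun cnt => 2 ≤ cnt) : Int) := by
  induction l generalizing a with
  | nil => simp
  | cons x t ih =>
      simp only [List.foldl_cons, List.countP_cons, ih]
      by_cases h : (2:Int) ≤ x
      · simp [h]; ring
      · simp [h]

theorem pvA_eq_spec (words : List String) (k : Int) :
    prefixConnected words k
      = (pvSpecCount ((words.filter (fun w => k ≤ (w.length : Int))).map
          (fun w => PySem.Str.slice w none (some k))) : Int) := by
  unfold prefixConnected
  rw [pvA_fold_dict, pvCount_fold]
  set ps := (words.filter (fun w => k ≤ (w.length : Int))).map
      (fun w => PySem.Str.slice w none (some k)) with hps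
  have hv : (PySem.Dict.counter ps).values
      = ((PySem.Set.ofList ps).map (fun p => (p, (ps.count p : Int)))).map (·.2) := by
    show (PySem.Dict.counter ps).items.map (·.2) = _
    rw [PySem.Dict.items_counter]
  rw [hv, List.map_map, List.countP_map,
    show ((fun cnt => decide ((2:Int) ≤ cnt)) ∘ (fun x => x.2) ∘ fun p => (p, ((ps.count p : Int))))
        = (fun p => decide (2 ≤ ps.count p)) from funext fun p => by simp,
    pvCountP_ofList_eq_spec]
  simp

theorem pvRunScan_aux (n : Nat) : ∀ (l : List String), l.length ≤ n → l.Pairwise (· ≤ ·) →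
    pvRunScan l = (pvSpecCount l : Int) := by
  induction n with
  | zero =>
      intro l hl _
      have : l = [] := List.eq_nil_of_length_eq_zero (Nat.le_zero.mp hl)
      subst this
      simp [pvRunScan, pvSpecCount]
  | succ n ih =>
      intro l hl hp
      match l with
      | [] => simp [pvRunScan, pvSpecCount]
      | x :: rest =>
        have hle : ∀ y ∈ rest, x ≤ y := (List.pairwise_cons.mp hp).1
        have hsplit : rest.takeWhile (fun y => y == x) ++ rest.dropWhile (fun y => y == x) = rest :=
          List.takeWhile_append_dropWhile
        have hsame : ∀ y ∈ rest.takeWhile (fun y => y == x), y = x := by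
          intro y hy
          simpa using List.mem_takeWhile_imp hy
        have hpR : (rest.dropWhile (fun y => y == x)).Pairwise (· ≤ ·) :=
          (List.pairwise_cons.mp hp).2.sublist (List.dropWhile_sublist _)
        have hxR : x ∉ rest.dropWhile (fun y => y == x) := by
          intro hx
          rcases hR : rest.dropWhile (fun y => y == x) with _ | ⟨hh, tt⟩
          · rw [hR] at hx; exact List.not_mem_nil hx
          · have hne : rest.dropWhile (fun y => y == x) ≠ [] := by rw [hR]; simp
            have hh? : (rest.dropWhile (fun y => y == x)).head? = some hh := by rw [hR]; rfl
            have hhead : (rest.dropWhile (fun y => y == x)).head hne = hh := by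
              have h' := List.head?_eq_some_head (l := rest.dropWhile (fun y => y == x)) hne
              rw [hh?] at h'
              exact (Option.some_injective _ h').symm
            have hheadne : hh ≠ x := by
              have h' := List.head_dropWhile_not (fun y => y == x) hne
              rw [hhead] at h'
              simpa using h'
            have hhrest : hh ∈ rest := (List.dropWhile_sublist _).subset (by rw [hR]; simp)
            rw [hR] at hx
            rcases List.mem_cons.mp hx with he | ht
            · exact hheadne he.symm
            · have hpR' := hpR
              rw [hR] at hpR'
              exact hheadne (le_antisymm ((List.pairwise_cons.mp hpR').1 x ht) (hle _ hhrest))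
        have hcx : (x :: rest).count x = 1 + (rest.takeWhile (fun y => y == x)).length := by
          have hrc : rest.count x = (rest.takeWhile (fun y => y == x)).length := by
            conv_lhs => rw [← hsplit]
            rw [List.count_append,
              List.count_eq_length.mpr (fun b hb => (hsame b hb).symm),
              List.count_eq_zero.mpr hxR]
            omega
          rw [List.count_cons_self, hrc]
          omega
        have hcp : ∀ p, p ≠ x → (x :: rest).count p = (rest.dropWhile (fun y => y == x)).count p := by
          intro p hpx
          have h0 : (rest.takeWhile (fun y => y == x)).count p = 0 :=
            List.count_eq_zero.mpr (fun hm => hpx (hsame p hm))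
          have hrc : rest.count p = (rest.dropWhile (fun y => y == x)).count p := by
            conv_lhs => rw [← hsplit]
            rw [List.count_append, h0]
            omega
          simp [hrc, Ne.symm hpx]
        have hfin : (x :: rest).toFinset = insert x (rest.dropWhile (fun y => y == x)).toFinset := by
          apply Finset.ext
          intro p
          simp only [List.toFinset_cons, Finset.mem_insert, List.mem_toFinset]
          constructor
          · rintro (h | h)
            · exact Or.inl h
            · rw [← hsplit] at h
              rcases List.mem_append.mp h with h | h
              · exact Or.inl (hsame p h)
              · exact Or.inr h
          · rintro (h | h)
            · exact Or.inl h
            · refine Or.inr ?_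
              rw [← hsplit]
              exact List.mem_append.mpr (Or.inr h)
        have hfilter : (rest.dropWhile (fun y => y == x)).toFinset.filter (fun p => 2 ≤ (x :: rest).count p)
            = (rest.dropWhile (fun y => y == x)).toFinset.filter
                (fun p => 2 ≤ (rest.dropWhile (fun y => y == x)).count p) := by
          apply Finset.filter_congr
          intro p hpmem
          have hpx : p ≠ x := fun he => by subst he; exact hxR (List.mem_toFinset.mp hpmem)
          rw [hcp p hpx]
        have hxnf : x ∉ (rest.dropWhile (fun y => y == x)).toFinset.filter
            (fun p => 2 ≤ (rest.dropWhile (fun y => y == x)).count p) := by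
          intro hm
          exact hxR (List.mem_toFinset.mp (Finset.mem_filter.mp hm).1)
        have hstep : pvSpecCount (x :: rest)
            = (if 2 ≤ 1 + (rest.takeWhile (fun y => y == x)).length then 1 else 0)
              + pvSpecCount (rest.dropWhile (fun y => y == x)) := by
          unfold pvSpecCount
          rw [hfin, Finset.filter_insert, hfilter, hcx]
          split_ifs with hc
          · rw [Finset.card_insert_of_notMem hxnf]; omega
          · omega
        have hIH := ih (rest.dropWhile (fun y => y == x))
          (by have := List.length_dropWhile_le (fun y => y == x) rest; simp at hl; omega)
          hpR
        rw [pvRunScan, hIH, hstep]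
        push_cast
        split_ifs <;> ring

-- ===== VERDICT (by name: the statement is the Claim_ definition above) =====
theorem prefixConnected_spec : Claim_equal_prefixConnected := by
  intro words k _
  unfold Spec_prefixConnected prefixConnected_alt
  rw [pvA_eq_spec,
    pvRunScan_aux _ _ le_rfl (PySem.List.sorted_pairwise _ _),
    pvSpecCount_perm (PySem.List.sorted_perm _ _ _)]
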